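-- pv_equiv track=rewrite | github.com/By-Xin/BuddyParallel | companion/app/buddy_parallel/services/notice_bridge_common.py | chunk_notice_text
-- ===== SOURCE A (Python) =====
-- MAX_CHUNK_CHARS = 48
--
-- def chunk_notice_text(text: str, max_chars: int = MAX_CHUNK_CHARS) -> list[str]:
--     normalized = " ".join(str(text or "").split())
--     if not normalized:
--         return ["(>_<) beep beep"]
--
--     chunks: list[str] = []
--     current = ""
--     for word in normalized.split(" "):
--         while len(word) > max_chars:
--             if current:
--                 chunks.append(current)
--                 current = ""
--             chunks.append(word[:max_chars])
--             word = word[max_chars:]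
--         candidate = word if not current else f"{current} {word}"
--         if len(candidate) <= max_chars:
--             current = candidate
--         else:
--             if current:
--                 chunks.append(current)
--             current = word
--     if current:
--         chunks.append(current)
--     return chunks or ["(>_<) beep beep"]
-- ===== SOURCE B (Python) =====
-- MAX_CHUNK_CHARS = 48
--
--
-- def chunk_notice_text(text, max_chars=MAX_CHUNK_CHARS):
--     words = str(text or "").split()
--     if not words:
--         return ["(>_<) beep beep"]
--     # Pass 1: flatten every word into fixed-width pieces; all but the last
--     # piece of a word must stand alone ("forced"), the last one may be joined.
--     tokens = []
--     for word in words: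
--         pieces = [word[i:i + max_chars] for i in range(0, len(word), max_chars)]
--         tokens.extend((p, True) for p in pieces[:-1])
--         tokens.append((pieces[-1], False))
--     # Pass 2: greedy packing; the open chunk is kept as a word list + length.
--     chunks = []
--     line = []      # words of the chunk being built
--     line_len = 0   # == len(" ".join(line))
--     for token, forced in tokens:
--         if forced:
--             if line:
--                 chunks.append(" ".join(line))
--                 line, line_len = [], 0
--             chunks.append(token)
--         else:
--             cand_len = len(token) if not line else line_len + 1 + len(token)
--             if cand_len <= max_chars:
--                 line.append(token)
--                 line_len = cand_len
--             else:
--                 if line: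
--                     chunks.append(" ".join(line))
--                 line, line_len = [token], len(token)
--     if line:
--         chunks.append(" ".join(line))
--     return chunks
-- ===== Notes on version B (the rewrite author's own statement) =====
-- stated objective: alternative
-- what changed: A normalizes by join+re-split and splits over-long words with a while loop interleaved into the greedy packer; B works directly on text.split(), first flattening every word into fixed-width slices via a range-stepped comprehension (forced pieces + joinable tail) and then greedy-packing that flat token stream while keeping the open chunk as a word list with a running length instead of a string.
import Mathlib
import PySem

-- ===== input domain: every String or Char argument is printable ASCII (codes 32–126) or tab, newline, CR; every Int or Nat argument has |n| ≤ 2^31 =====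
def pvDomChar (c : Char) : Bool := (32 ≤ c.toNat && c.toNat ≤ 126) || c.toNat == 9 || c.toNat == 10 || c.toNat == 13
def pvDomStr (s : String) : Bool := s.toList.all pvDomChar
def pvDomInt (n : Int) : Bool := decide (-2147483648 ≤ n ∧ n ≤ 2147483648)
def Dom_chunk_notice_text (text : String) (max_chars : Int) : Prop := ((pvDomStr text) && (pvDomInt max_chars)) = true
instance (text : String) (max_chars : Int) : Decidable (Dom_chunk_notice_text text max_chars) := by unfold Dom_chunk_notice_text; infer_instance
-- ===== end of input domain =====

-- B replaces A's join/re-split normalization and interleaved while-splitting by two flat passes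
-- (slice each word into fixed-width pieces, then greedy-pack with a word-list accumulator); objective: alternative.


-- ===== PORT A =====
-- the 'while len(word) > max_chars' loop; fuel = word.length suffices whenever max_chars ≥ 1 (Pre_)
def pvWhileA (max : Int) : Nat → List Char → List (List Char) → List Char → List (List Char) × List Char × List Char
  | 0, word, chunks, current => (chunks, current, word)
  | fuel + 1, word, chunks, current =>
    if max < (word.length : Int) then
      let chunks := if current.isEmpty then chunks else chunks ++ [current]
      pvWhileA max fuel (PySem.List.slice word (some max) none)
        (chunks ++ [PySem.List.slice word none (some max)]) []
    else (chunks, current, word)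

-- one iteration of A's 'for word in normalized.split(" ")' loop body
def pvStepA (max : Int) (st : List (List Char) × List Char) (word : List Char) :
    List (List Char) × List Char :=
  let r := pvWhileA max word.length word st.1 st.2
  let chunks := r.1
  let current := r.2.1
  let word := r.2.2
  let candidate := if current.isEmpty then word else current ++ ' ' :: word
  if (candidate.length : Int) ≤ max then (chunks, candidate)
  else ((if current.isEmpty then chunks else chunks ++ [current]), word)

-- 'str(text or "")' is the identity on a str argument, so it is ported as text itself
def chunk_notice_text (text : String) (max_chars : Int) : List String :=
  let normalized := PySem.Chars.join [' '] (PySem.Chars.split₀ text.toList)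
  if normalized.isEmpty then ["(>_<) beep beep"]
  else
    let ws := PySem.Chars.splitOn normalized [' ']
    let st := ws.foldl (pvStepA max_chars) ([], [])
    let chunks := if st.2.isEmpty then st.1 else st.1 ++ [st.2]
    if chunks.isEmpty then ["(>_<) beep beep"] else chunks.map String.ofList

-- ===== PORT B =====
-- pieces = [word[i:i+max_chars] for i in range(0, len(word), max_chars)]; all but the last are forced
def pvTokensB (max : Int) (word : List Char) : List (List Char × Bool) :=
  let pieces := (PySem.List.pyRange 0 (word.length : Int) max).map
    (fun i => PySem.List.slice word (some i) (some (i + max)))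
  (PySem.List.slice pieces none (some (-1))).map (fun p => (p, true))
    ++ [(PySem.List.pyGetD pieces (-1) [], false)]

-- one iteration of B's packing loop; state = (chunks, line, line_len)
def pvStepB (max : Int) (st : List (List Char) × List (List Char) × Int) (tk : List Char × Bool) :
    List (List Char) × List (List Char) × Int :=
  if tk.2 then
    let st' := if st.2.1.isEmpty then st
      else (st.1 ++ [PySem.Chars.join [' '] st.2.1], [], 0)
    (st'.1 ++ [tk.1], st'.2.1, st'.2.2)
  else
    let candLen : Int := if st.2.1.isEmpty then (tk.1.length : Int) else st.2.2 + 1 + (tk.1.length : Int)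
    if candLen ≤ max then (st.1, st.2.1 ++ [tk.1], candLen)
    else ((if st.2.1.isEmpty then st.1 else st.1 ++ [PySem.Chars.join [' '] st.2.1]), [tk.1], (tk.1.length : Int))

def chunk_notice_text_alt (text : String) (max_chars : Int) : List String :=
  let words := PySem.Chars.split₀ text.toList
  if words.isEmpty then ["(>_<) beep beep"]
  else
    let tokens := words.foldl (fun acc w => acc ++ pvTokensB max_chars w) []
    let st := tokens.foldl (pvStepB max_chars) ([], [], 0)
    let chunks := if st.2.1.isEmpty then st.1 else st.1 ++ [PySem.Chars.join [' '] st.2.1]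
    chunks.map String.ofList

-- ===== PRECONDITION & SPEC =====
-- Pre_ excludes exactly the inputs on which Python A never returns: with max_chars ≤ 0 and at least one
-- non-whitespace character, A's 'while len(word) > max_chars' loop never terminates (so A returns on all of Pre_).
def Pre_chunk_notice_text (text : String) (max_chars : Int) : Prop :=
  1 ≤ max_chars ∨ text.toList.all PySem.Chars.isspace = true
instance (text : String) (max_chars : Int) : Decidable (Pre_chunk_notice_text text max_chars) := by
  unfold Pre_chunk_notice_text; infer_instance
def pvWitness_chunk_notice_text : String × Int := ("hello world, wrap me", 7)

def Spec_chunk_notice_text (text : String) (max_chars : Int) (out : List String) : Prop := out = chunk_notice_text_alt text max_chars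
instance (text : String) (max_chars : Int) (out : List String) : Decidable (Spec_chunk_notice_text text max_chars out) := by unfold Spec_chunk_notice_text; infer_instance

-- ===== CLAIM (what is proved, stated in full; the proofs are below) =====
def Claim_equal_chunk_notice_text : Prop := ∀ (text : String) (max_chars : Int), Dom_chunk_notice_text text max_chars → Pre_chunk_notice_text text max_chars → Spec_chunk_notice_text text max_chars (chunk_notice_text text max_chars)

-- ===== LEMMAS AND PROOFS =====
-- == split₀ facts ==
theorem pvSplit0_go_sound (s : List Char) : ∀ (cur : List Char) (acc : List (List Char)),
    (∀ c ∈ cur, PySem.Chars.isspace c = false) →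
    (∀ w ∈ acc, w ≠ [] ∧ ∀ c ∈ w, PySem.Chars.isspace c = false) →
    ∀ w ∈ PySem.Chars.split₀.go s cur acc, w ≠ [] ∧ ∀ c ∈ w, PySem.Chars.isspace c = false := by
  induction s with
  | nil =>
    intro cur acc hcur hacc w hw
    by_cases h : cur.isEmpty
    · simp [PySem.Chars.split₀.go, h] at hw
      exact hacc w hw
    · simp [PySem.Chars.split₀.go, h] at hw
      rcases hw with hw | hw
      · exact hacc w hw
      · subst hw
        constructor
        · simp [List.isEmpty_iff] at h; simp [h]
        · intro c hc; exact hcur c (by simpa using hc)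
  | cons c rest ih =>
    intro cur acc hcur hacc w hw
    by_cases hs : PySem.Chars.isspace c
    · by_cases h : cur.isEmpty
      · simp only [PySem.Chars.split₀.go, hs, h, if_true] at hw
        exact ih [] acc (by simp) hacc w hw
      · simp only [PySem.Chars.split₀.go, hs, h, if_true] at hw
        refine ih [] _ (by simp) ?_ w hw
        intro v hv
        rcases List.mem_cons.mp hv with hv | hv
        · subst hv
          refine ⟨by simp [List.isEmpty_iff] at h; simp [h], ?_⟩
          intro d hd; exact hcur d (by simpa using hd)
        · exact hacc v hv
    · simp only [PySem.Chars.split₀.go, hs, Bool.false_eq_true, if_false] at hw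
      refine ih (c :: cur) acc ?_ hacc w hw
      intro d hd
      rcases List.mem_cons.mp hd with hd | hd
      · subst hd; simpa using hs
      · exact hcur d hd

theorem pvSplit0_sound (s : List Char) :
    ∀ w ∈ PySem.Chars.split₀ s, w ≠ [] ∧ ∀ c ∈ w, PySem.Chars.isspace c = false :=
  pvSplit0_go_sound s [] [] (by simp) (by simp)

theorem pvSplit0_go_allspace (s : List Char) : ∀ (acc : List (List Char)),
    (∀ c ∈ s, PySem.Chars.isspace c = true) →
    PySem.Chars.split₀.go s [] acc = acc.reverse := by
  induction s with
  | nil => intro acc _; simp [PySem.Chars.split₀.go]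
  | cons c rest ih =>
    intro acc h
    have hc : PySem.Chars.isspace c = true := h c (by simp)
    simp only [PySem.Chars.split₀.go, hc, if_true, List.isEmpty_nil]
    exact ih acc (fun d hd => h d (by simp [hd]))

theorem pvSplit0_allspace (s : List Char) (h : ∀ c ∈ s, PySem.Chars.isspace c = true) :
    PySem.Chars.split₀ s = [] :=
  pvSplit0_go_allspace s [] h

-- == join facts ==
theorem pvJoin_cons (w : List Char) (rest : List (List Char)) :
    PySem.Chars.join [' '] (w :: rest)
      = if rest.isEmpty then w else w ++ ' ' :: PySem.Chars.join [' '] rest := by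
  cases rest with
  | nil => simp [PySem.Chars.join_singleton]
  | cons q t => simp [PySem.Chars.join_cons_cons]

theorem pvJoin_ne_nil (line : List (List Char)) (hne : line ≠ [])
    (h : ∀ w ∈ line, w ≠ []) : PySem.Chars.join [' '] line ≠ [] := by
  cases line with
  | nil => exact absurd rfl hne
  | cons w t =>
    rw [pvJoin_cons]
    cases t with
    | nil => simpa using h w (by simp)
    | cons q s =>
      simp only [List.isEmpty_cons, if_false, Bool.false_eq_true]
      simp [h w (by simp)]

theorem pvJoin_append_singleton (line : List (List Char)) (w : List Char) :
    PySem.Chars.join [' '] (line ++ [w])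
      = if line.isEmpty then w else PySem.Chars.join [' '] line ++ ' ' :: w := by
  induction line with
  | nil => simp [PySem.Chars.join_singleton]
  | cons p t ih =>
    rw [List.cons_append, pvJoin_cons, pvJoin_cons (rest := t), ih]
    cases t with
    | nil => simp
    | cons q s => simp

-- == splitOn/join roundtrip ==
theorem pvGo_nil (fuel : Nat) (cur : List Char) (acc : List (List Char)) :
    PySem.Chars.splitOn.go [' '] fuel [] cur acc = (cur.reverse :: acc).reverse := by
  cases fuel <;> simp [PySem.Chars.splitOn.go]

theorem pvGo_space (fuel : Nat) (l cur : List Char) (acc : List (List Char)) :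
    PySem.Chars.splitOn.go [' '] (fuel + 1) (' ' :: l) cur acc
      = PySem.Chars.splitOn.go [' '] fuel l [] (cur.reverse :: acc) := by
  simp [PySem.Chars.splitOn.go, List.isPrefixOf]

theorem pvGo_word (w : List Char) (hw : ' ' ∉ w) : ∀ (fuel : Nat), w.length ≤ fuel →
    ∀ (l cur : List Char) (acc : List (List Char)),
    PySem.Chars.splitOn.go [' '] fuel (w ++ l) cur acc
      = PySem.Chars.splitOn.go [' '] (fuel - w.length) l (w.reverse ++ cur) acc := by
  induction w with
  | nil => intro fuel _ l cur acc; simp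
  | cons c t ih =>
    intro fuel hf l cur acc
    have hf' : t.length + 1 ≤ fuel := by simpa using hf
    obtain ⟨f, rfl⟩ : ∃ f, fuel = f + 1 := ⟨fuel - 1, by omega⟩
    have hc : c ≠ ' ' := fun h => hw (by simp [h])
    have ht : ' ' ∉ t := fun h => hw (by simp [h])
    simp only [List.cons_append]
    rw [show PySem.Chars.splitOn.go [' '] (f + 1) (c :: (t ++ l)) cur acc
        = PySem.Chars.splitOn.go [' '] f (t ++ l) (c :: cur) acc by
      simp [PySem.Chars.splitOn.go, List.isPrefixOf, Ne.symm hc]]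
    rw [ih ht f (by simpa using hf) l (c :: cur) acc]
    simp only [List.length_cons]
    congr 1
    · omega
    · simp

theorem pvGo_join (ws : List (List Char)) (hne : ws ≠ [])
    (hsp : ∀ w ∈ ws, ' ' ∉ w) : ∀ (fuel : Nat),
    (PySem.Chars.join [' '] ws).length ≤ fuel → ∀ (acc : List (List Char)),
    PySem.Chars.splitOn.go [' '] fuel (PySem.Chars.join [' '] ws) [] acc
      = acc.reverse ++ ws := by
  induction ws with
  | nil => exact absurd rfl hne
  | cons w t ih =>
    intro fuel hf acc
    rw [pvJoin_cons] at hf ⊢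
    cases t with
    | nil =>
      simp only [List.isEmpty_nil, if_true]
      rw [show w = w ++ [] by simp] at hf ⊢
      rw [pvGo_word w (hsp w (by simp)) fuel (by simpa using hf)]
      rw [pvGo_nil]
      simp
    | cons q s =>
      simp only [List.isEmpty_cons, if_false, Bool.false_eq_true] at hf ⊢
      rw [show w ++ ' ' :: PySem.Chars.join [' '] (q :: s)
          = w ++ (' ' :: PySem.Chars.join [' '] (q :: s)) by simp]
      rw [pvGo_word w (hsp w (by simp)) fuel (by simp at hf; omega)]
      obtain ⟨f, hfe⟩ : ∃ f, fuel - w.length = f + 1 := ⟨fuel - w.length - 1, by simp at hf; omega⟩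
      rw [hfe, pvGo_space]
      rw [ih (by simp) (fun v hv => hsp v (by simp [hv])) f (by simp at hf ⊢; omega) _]
      simp

theorem pvRoundtrip (ws : List (List Char)) (hne : ws ≠ []) (hsp : ∀ w ∈ ws, ' ' ∉ w) :
    PySem.Chars.splitOn (PySem.Chars.join [' '] ws) [' '] = ws := by
  unfold PySem.Chars.splitOn
  rw [pvGo_join ws hne hsp _ (Nat.le_succ _) []]
  simp

-- == pieces / tokens rewrites ==
theorem pvPieces_eq (m : Nat) (hm : 1 ≤ m) (word : List Char) :
    (PySem.List.pyRange 0 (word.length : Int) (m : Int)).map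
      (fun i => PySem.List.slice word (some i) (some (i + (m : Int))))
    = (List.range (((word.length : Int) + m - 1) / (m : Int)).toNat).map
      (fun k => (word.drop (m * k)).take m) := by
  rw [PySem.List.pyRange_of_pos _ _ (by exact_mod_cast hm)]
  by_cases h0 : (0 : Int) < (word.length : Int)
  · rw [if_pos h0, List.map_map]
    apply List.map_congr_left
    intro k _
    simp only [Function.comp_apply, zero_add]
    have h1 : (m : Int) * (k : Int) = ((m * k : Nat) : Int) := by push_cast; ring
    rw [h1, show ((m * k : Nat) : Int) + (m : Int) = ((m * k + m : Nat) : Int) by push_cast; ring,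
      PySem.List.slice_natCast]
    congr 1
    omega
  · rw [if_neg h0]
    have hn : word.length = 0 := by omega
    have hz : ((word.length : Int) + m - 1) / (m : Int) = 0 := by
      rw [hn]
      apply Int.ediv_eq_zero_of_lt <;> push_cast <;> omega
    rw [hz]
    simp

theorem pvTokensB_small (max : Int) (word : List Char)
    (hne : word ≠ []) (hle : (word.length : Int) ≤ max) :
    pvTokensB max word = [(word, false)] := by
  have hm1 : 1 ≤ max := by
    have : 0 < word.length := List.length_pos_iff.mpr hne
    omega
  obtain ⟨m, rfl⟩ : ∃ m : Nat, max = (m : Int) := ⟨max.toNat, (Int.toNat_of_nonneg (by omega)).symm⟩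
  have hm : 1 ≤ m := by exact_mod_cast hm1
  have h0 : 0 < word.length := List.length_pos_iff.mpr hne
  unfold pvTokensB
  rw [pvPieces_eq m hm word]
  have hc : (((word.length : Int) + m - 1) / (m : Int)).toNat = 1 := by
    have : ((word.length : Int) + m - 1) / (m : Int) = 1 := by
      rw [← PySem.Int.floordiv_eq_ediv_of_pos (by exact_mod_cast hm)]
      rw [PySem.Int.floordiv_eq_iff_of_pos (by exact_mod_cast hm)]
      constructor <;> nlinarith
    rw [this]; rfl
  rw [hc]
  simp [List.range_one, PySem.List.slice_to_neg_one, PySem.List.pyGetD,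
    PySem.List.pyGet?_neg_one]
  exact_mod_cast hle

theorem pvTokensB_big (max : Int) (hmax : 1 ≤ max) (word : List Char)
    (hgt : max < (word.length : Int)) :
    pvTokensB max word
      = (word.take max.toNat, true) :: pvTokensB max (word.drop max.toNat) := by
  obtain ⟨m, rfl⟩ : ∃ m : Nat, max = (m : Int) := ⟨max.toNat, (Int.toNat_of_nonneg (by omega)).symm⟩
  have hm : 1 ≤ m := by exact_mod_cast hmax
  have hlt : m < word.length := by exact_mod_cast hgt
  have hmn : (m : Int).toNat = m := by simp
  rw [hmn]
  have hdroplen : (word.drop m).length = word.length - m := by simp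
  -- counts
  have hposm : (0 : Int) < (m : Int) := by exact_mod_cast hm
  have hC'nonneg : 0 ≤ (((word.length - m : Nat) : Int) + m - 1) / (m : Int) := by
    apply Int.ediv_nonneg <;> omega
  have hC'pos : 1 ≤ (((word.length - m : Nat) : Int) + m - 1) / (m : Int) := by
    rw [← PySem.Int.floordiv_eq_ediv_of_pos hposm, PySem.Int.le_floordiv_iff_mul_le hposm]
    omega
  have hsplit : ((word.length : Int) + m - 1)
      = ((((word.length - m : Nat) : Int) + m - 1) + 1 * (m : Int)) := by
    push_cast [Nat.le_of_lt hlt]; ring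
  have hCC : (((word.length : Int) + m - 1) / (m : Int)).toNat
      = ((((word.length - m : Nat) : Int) + m - 1) / (m : Int)).toNat + 1 := by
    rw [hsplit, Int.add_mul_ediv_right _ _ (by omega : (m : Int) ≠ 0)]
    rw [Int.toNat_add hC'nonneg (by norm_num : (0:Int) ≤ 1)]
    rfl
  rw [show pvTokensB (m : Int) word
      = (PySem.List.slice ((PySem.List.pyRange 0 (word.length : Int) (m : Int)).map
          (fun i => PySem.List.slice word (some i) (some (i + (m : Int))))) none (some (-1))).map
            (fun p => (p, true))
        ++ [(PySem.List.pyGetD ((PySem.List.pyRange 0 (word.length : Int) (m : Int)).map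
          (fun i => PySem.List.slice word (some i) (some (i + (m : Int))))) (-1) [], false)] from rfl]
  rw [show pvTokensB (m : Int) (word.drop m)
      = (PySem.List.slice ((PySem.List.pyRange 0 ((word.drop m).length : Int) (m : Int)).map
          (fun i => PySem.List.slice (word.drop m) (some i) (some (i + (m : Int))))) none (some (-1))).map
            (fun p => (p, true))
        ++ [(PySem.List.pyGetD ((PySem.List.pyRange 0 ((word.drop m).length : Int) (m : Int)).map
          (fun i => PySem.List.slice (word.drop m) (some i) (some (i + (m : Int))))) (-1) [], false)] from rfl]
  rw [pvPieces_eq m hm word, pvPieces_eq m hm (word.drop m), hdroplen, hCC]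
  rw [List.range_succ_eq_map, List.map_cons, List.map_map]
  have hfun : ((fun k => (word.drop (m * k)).take m) ∘ Nat.succ)
      = (fun k => ((word.drop m).drop (m * k)).take m) := by
    funext k
    simp only [Function.comp_apply, List.drop_drop]
    congr 2
    rw [Nat.mul_succ]
    omega
  rw [hfun]
  have hps : ((List.range ((((word.length - m : Nat) : Int) + m - 1) / (m : Int)).toNat).map
      (fun k => ((word.drop m).drop (m * k)).take m)) ≠ [] := by
    simp only [ne_eq, List.map_eq_nil_iff, List.range_eq_nil]
    omega
  set ps := (List.range ((((word.length - m : Nat) : Int) + m - 1) / (m : Int)).toNat).map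
      (fun k => ((word.drop m).drop (m * k)).take m) with hpsdef
  obtain ⟨q, t, hqt⟩ := List.exists_cons_of_ne_nil hps
  rw [hqt]
  simp only [PySem.List.slice_to_neg_one, List.dropLast_cons₂, List.map_cons,
    PySem.List.pyGetD, PySem.List.pyGet?_neg_one, List.getLast?_cons_cons, mul_zero,
    List.drop_zero, List.cons_append]

-- == while-loop lemmas ==
theorem pvWhileA_stop (max : Int) (fuel : Nat) (word : List Char)
    (chunks : List (List Char)) (cur : List Char) (h : ¬ max < (word.length : Int)) :
    pvWhileA max fuel word chunks cur = (chunks, cur, word) := by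
  cases fuel with
  | zero => rfl
  | succ f => simp [pvWhileA, h]

theorem pvWhileA_fuel (max : Int) (hmax : 1 ≤ max) : ∀ (fuel fuel' : Nat) (word : List Char)
    (chunks : List (List Char)) (cur : List Char),
    word.length ≤ fuel → word.length ≤ fuel' →
    pvWhileA max fuel word chunks cur = pvWhileA max fuel' word chunks cur := by
  intro fuel
  induction fuel with
  | zero =>
    intro fuel' word chunks cur hf hf'
    have : word.length = 0 := by omega
    have hstop : ¬ max < (word.length : Int) := by rw [this]; push_cast; omega
    rw [pvWhileA_stop max 0 word chunks cur hstop, pvWhileA_stop max fuel' word chunks cur hstop]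
  | succ f ih =>
    intro fuel' word chunks cur hf hf'
    by_cases hg : max < (word.length : Int)
    · have h1 : 1 ≤ word.length := by
        by_contra h
        have : word.length = 0 := by omega
        rw [this] at hg; push_cast at hg; omega
      obtain ⟨f', rfl⟩ : ∃ g, fuel' = g + 1 := ⟨fuel' - 1, by omega⟩
      have hdlen : (PySem.List.slice word (some max) none).length = word.length - max.toNat := by
        rw [PySem.List.slice_from word (by omega)]; simp
      simp only [pvWhileA, hg, if_pos]
      apply ih
      · rw [hdlen]; omega
      · rw [hdlen]; omega
    · rw [pvWhileA_stop max _ word chunks cur hg, pvWhileA_stop max _ word chunks cur hg]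

theorem pvStepA_unroll (max : Int) (hmax : 1 ≤ max) (word : List Char)
    (sa : List (List Char) × List Char) (hg : max < (word.length : Int)) :
    pvStepA max sa word
      = pvStepA max ((if sa.2.isEmpty then sa.1 else sa.1 ++ [sa.2]) ++ [word.take max.toNat], [])
          (word.drop max.toNat) := by
  have h1 : 1 ≤ word.length := by
    by_contra h
    have : word.length = 0 := by omega
    rw [this] at hg; push_cast at hg; omega
  obtain ⟨f, hfe⟩ : ∃ f, word.length = f + 1 := ⟨word.length - 1, by omega⟩
  have hdlen : (PySem.List.slice word (some max) none).length = word.length - max.toNat := by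
    rw [PySem.List.slice_from word (by omega)]; simp
  unfold pvStepA
  rw [hfe]
  simp only [pvWhileA, hg, if_pos]
  rw [pvWhileA_fuel max hmax f (PySem.List.slice word (some max) none).length _ _ _
    (by rw [hdlen]; omega) (le_refl _)]
  rw [PySem.List.slice_from word (by omega : (0:Int) ≤ max),
    PySem.List.slice_to word (by omega : (0:Int) ≤ max)]

-- == the packing invariant ==
def pvInv (sa : List (List Char) × List Char)
    (sb : List (List Char) × List (List Char) × Int) : Prop :=
  sb.1 = sa.1 ∧ sa.2 = PySem.Chars.join [' '] sb.2.1
    ∧ sb.2.2 = ((PySem.Chars.join [' '] sb.2.1).length : Int)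
    ∧ ∀ w ∈ sb.2.1, w ≠ []

theorem pvEmpty_iff (line : List (List Char)) (h : ∀ w ∈ line, w ≠ []) :
    (PySem.Chars.join [' '] line).isEmpty = line.isEmpty := by
  cases hl : line with
  | nil => simp [PySem.Chars.join_nil]
  | cons w t =>
    have hne := pvJoin_ne_nil (w :: t) (by simp) (by rw [hl] at h; exact h)
    simp [hne]

-- per-word step equivalence
theorem pvStep_eq (max : Int) (hmax : 1 ≤ max) : ∀ (n : Nat) (word : List Char),
    word.length ≤ n → word ≠ [] →
    ∀ (sa : List (List Char) × List Char) (sb : List (List Char) × List (List Char) × Int),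
    pvInv sa sb →
    pvInv (pvStepA max sa word) ((pvTokensB max word).foldl (pvStepB max) sb)
      ∧ ((pvTokensB max word).foldl (pvStepB max) sb).2.1 ≠ [] := by
  intro n
  induction n with
  | zero =>
    intro word hlen hne sa sb hinv
    exact absurd (List.length_eq_zero_iff.mp (by omega)) hne
  | succ n ih =>
    intro word hlen hne sa sb hinv
    obtain ⟨ca, cur⟩ := sa
    obtain ⟨cb, line, llen⟩ := sb
    obtain ⟨h1, h2, h3, h4⟩ := hinv
    simp only at h1 h2 h3 h4
    by_cases hg : max < (word.length : Int)
    · -- forced piece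
      rw [pvTokensB_big max hmax word hg, pvStepA_unroll max hmax word (ca, cur) hg,
        List.foldl_cons]
      have hword' : (word.drop max.toNat).length = word.length - max.toNat := by simp
      have hm1 : 1 ≤ max.toNat := by omega
      have hmlt : max.toNat < word.length := by omega
      have hstep : pvStepB max (cb, line, llen) (word.take max.toNat, true)
          = ((if cur.isEmpty then ca else ca ++ [cur]) ++ [word.take max.toNat], [], 
             if line.isEmpty then llen else 0) := by
        by_cases hl : line.isEmpty
        · have hlnil : line = [] := List.isEmpty_iff.mp hl
          have hcnil : cur = [] := by rw [h2, hlnil, PySem.Chars.join_nil]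
          simp [pvStepB, h1, hlnil, hcnil]
        · have hcne : PySem.Chars.join [' '] line ≠ [] :=
            pvJoin_ne_nil line (by simpa [List.isEmpty_iff] using hl) h4
          simp [pvStepB, hl, h1, h2, hcne]
      rw [hstep]
      have hllen0 : (if line.isEmpty then llen else 0) = ((PySem.Chars.join [' '] ([] : List (List Char))).length : Int) := by
        by_cases hl : line.isEmpty
        · have hlnil : line = [] := List.isEmpty_iff.mp hl
          rw [if_pos hl, h3, hlnil]
        · simp [hl, PySem.Chars.join_nil]
      refine ih (word.drop max.toNat) (by omega) ?_ _ _ ?_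
      · intro hnil
        have := congrArg List.length hnil
        simp at this
        omega
      · refine ⟨rfl, by simp [PySem.Chars.join_nil], ?_, by simp⟩
        simpa using hllen0
    · -- joinable tail piece
      rw [pvTokensB_small max word hne (by omega), List.foldl_cons, List.foldl_nil]
      unfold pvStepA
      rw [pvWhileA_stop max _ word ca cur hg]
      have hEmpEq : cur.isEmpty = line.isEmpty := by rw [h2]; exact pvEmpty_iff line h4
      have hcand : ((if cur.isEmpty then word else cur ++ ' ' :: word).length : Int)
          = (if line.isEmpty then ((word.length : Int))
             else llen + 1 + (word.length : Int)) := by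
        rw [hEmpEq]
        by_cases hl : line.isEmpty
        · simp [hl]
        · simp [hl, h2, h3]
          ring
      by_cases hfit : (if line.isEmpty then ((word.length : Int)) else llen + 1 + (word.length : Int)) ≤ max
      · -- accepted into the open chunk
        simp only [pvStepB, Bool.false_eq_true, if_false, hcand, hfit, if_pos]
        have hjoin : (if cur.isEmpty then word else cur ++ ' ' :: word)
            = PySem.Chars.join [' '] (line ++ [word]) := by
          rw [pvJoin_append_singleton, hEmpEq, h2]
        refine ⟨⟨h1, by simpa using hjoin, ?_, ?_⟩, by simp⟩
        · show (if line.isEmpty then ((word.length : Int)) else llen + 1 + (word.length : Int))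
              = ((PySem.Chars.join [' '] (line ++ [word])).length : Int)
          rw [pvJoin_append_singleton]
          by_cases hl : line.isEmpty
          · simp [hl]
          · simp only [hl, Bool.false_eq_true, if_false, List.length_append, List.length_cons, h3]
            push_cast
            ring
        · intro w hw
          rcases List.mem_append.mp hw with hw | hw
          · exact h4 w hw
          · simp at hw; subst hw; exact hne
      · -- flush and start a new chunk
        simp only [pvStepB, Bool.false_eq_true, if_false, hcand, hfit]
        refine ⟨⟨?_, by simp [PySem.Chars.join_singleton], by simp [PySem.Chars.join_singleton], ?_⟩, by simp⟩
        · simp only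
          rw [hEmpEq, h1, h2]
        · intro w hw
          simp at hw; subst hw; exact hne

-- fold over the whole word list
theorem pvFold_eq (max : Int) (hmax : 1 ≤ max) : ∀ (ws : List (List Char)),
    (∀ w ∈ ws, w ≠ []) →
    ∀ (sa : List (List Char) × List Char) (sb : List (List Char) × List (List Char) × Int),
    pvInv sa sb →
    pvInv (ws.foldl (pvStepA max) sa) ((ws.flatMap (pvTokensB max)).foldl (pvStepB max) sb)
      ∧ (ws ≠ [] → ((ws.flatMap (pvTokensB max)).foldl (pvStepB max) sb).2.1 ≠ []) := by
  intro ws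
  induction ws with
  | nil => intro _ sa sb hinv; exact ⟨hinv, fun h => absurd rfl h⟩
  | cons w t ih =>
    intro hws sa sb hinv
    rw [List.flatMap_cons, List.foldl_append, List.foldl_cons]
    have hstep := pvStep_eq max hmax w.length w (le_refl _) (hws w (by simp)) sa sb hinv
    cases t with
    | nil =>
      simp only [List.flatMap_nil, List.foldl_nil, List.foldl_nil]
      exact ⟨hstep.1, fun _ => hstep.2⟩
    | cons q s =>
      have := ih (fun v hv => hws v (by simp [hv])) _ _ hstep.1
      rw [List.flatMap_cons, List.foldl_append] at this ⊢
      exact ⟨this.1, fun _ => this.2 (by simp)⟩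

-- final assembly
theorem pvMain (text : String) (max_chars : Int)
    (hpre : 1 ≤ max_chars ∨ text.toList.all PySem.Chars.isspace = true) :
    chunk_notice_text text max_chars = chunk_notice_text_alt text max_chars := by
  by_cases hws : PySem.Chars.split₀ text.toList = []
  · simp only [chunk_notice_text, chunk_notice_text_alt]
    rw [hws]
    simp [PySem.Chars.join_nil]
  · have hmax : 1 ≤ max_chars := by
      rcases hpre with h | h
      · exact h
      · exact absurd (pvSplit0_allspace text.toList (by simpa [List.all_eq_true] using h)) hws
    have hsound := pvSplit0_sound text.toList
    have hnonempty : ∀ w ∈ PySem.Chars.split₀ text.toList, w ≠ [] := fun w hw => (hsound w hw).1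
    have hnospace : ∀ w ∈ PySem.Chars.split₀ text.toList, ' ' ∉ w := by
      intro w hw hsp
      have := (hsound w hw).2 ' ' hsp
      simp [PySem.Chars.isspace] at this
    have hJne : PySem.Chars.join [' '] (PySem.Chars.split₀ text.toList) ≠ [] :=
      pvJoin_ne_nil _ hws hnonempty
    simp only [chunk_notice_text, chunk_notice_text_alt]
    rw [pvRoundtrip _ hws hnospace]
    simp only [List.isEmpty_iff, hJne, hws, if_false]
    have hfold := pvFold_eq max_chars hmax (PySem.Chars.split₀ text.toList) hnonempty
      ([], []) ([], [], 0) ⟨rfl, by simp [PySem.Chars.join_nil], by simp [PySem.Chars.join_nil], by simp⟩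
    rw [PySem.List.foldl_append_eq_flatMap (pvTokensB max_chars) (PySem.Chars.split₀ text.toList) []]
    simp only [List.nil_append]
    obtain ⟨⟨hb1, hb2, hb3, hb4⟩, hlast⟩ := hfold
    have hline := hlast hws
    have hcurne : (List.foldl (pvStepA max_chars) ([], []) (PySem.Chars.split₀ text.toList)).2 ≠ [] := by
      rw [hb2]; exact pvJoin_ne_nil _ hline hb4
    have hJline : PySem.Chars.join [' ']
        (List.foldl (pvStepB max_chars) ([], [], 0)
          (List.flatMap (pvTokensB max_chars) (PySem.Chars.split₀ text.toList))).2.1 ≠ [] := by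
      rw [← hb2]; exact hcurne
    simp [hb1, hb2, hline, hJline]

-- ===== VERDICT (by name: the statement is the Claim_ definition above) =====
theorem chunk_notice_text_spec : Claim_equal_chunk_notice_text := by
  intro text max_chars _ hpre
  unfold Pre_chunk_notice_text at hpre
  unfold Spec_chunk_notice_text
  exact pvMain text max_chars hpre
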